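-- pv_equiv track=rewrite | github.com/Evilnames/Collector | sculpture.py | _make_step_pyramid_grid
-- ===== SOURCE A (Python) =====
-- def _empty(h):
--     return [[False] * 8 for _ in range(h * 4)]
--
-- def _make_step_pyramid_grid(height):
--     rows  = height * 4
--     steps = min(4, max(2, rows // 3))
--     g     = _empty(height)
--     sh    = max(1, rows // steps)
--     for s in range(steps):
--         r0  = s * sh;  r1 = min(rows, r0 + sh)
--         w   = max(2, 8 - s * 2)
--         pad = (8 - w) // 2
--         for r in range(r0, r1):
--             for c in range(pad, pad + w): g[r][c] = True
--     for r in range(steps * sh, rows):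
--         w = max(2, 8 - (steps - 1) * 2); pad = (8 - w) // 2
--         for c in range(pad, pad + w): g[r][c] = True
--     return g
-- ===== SOURCE B (Python) =====
-- def _make_step_pyramid_grid(height):
--     rows  = height * 4
--     steps = min(4, max(2, rows // 3))
--     sh    = max(1, rows // steps)
--     pats  = []
--     for s in range(steps):
--         w   = max(2, 8 - s * 2)
--         pad = (8 - w) // 2
--         pats.append([False] * pad + [True] * w + [False] * (8 - pad - w))
--     return [pats[min(r // sh, steps - 1)].copy() for r in range(rows)]
-- ===== Notes on version B (the rewrite author's own statement) =====
-- stated objective: alternative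
-- what changed: Replaces the band-outer/row-inner cell-mutation loops plus the trailing leftover loop with: precompute the steps row patterns once, then a single pass over row indices that picks each row's pattern by min(r//sh, steps-1) and copies it.
import Mathlib
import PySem

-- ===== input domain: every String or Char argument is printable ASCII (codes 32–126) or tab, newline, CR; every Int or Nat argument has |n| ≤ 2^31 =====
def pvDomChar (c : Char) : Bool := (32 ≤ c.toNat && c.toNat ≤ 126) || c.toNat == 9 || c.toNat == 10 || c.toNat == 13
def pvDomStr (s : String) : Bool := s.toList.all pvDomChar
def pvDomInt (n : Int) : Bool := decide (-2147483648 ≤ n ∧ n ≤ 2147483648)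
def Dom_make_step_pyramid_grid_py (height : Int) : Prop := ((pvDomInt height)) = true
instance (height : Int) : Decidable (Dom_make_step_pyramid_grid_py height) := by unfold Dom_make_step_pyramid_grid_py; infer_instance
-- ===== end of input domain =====

-- B replaces A's band-outer/row-inner mutation loops (plus the trailing leftover loop) by one pass
-- that computes each row's step from its index and builds the row by concatenation (objective: simpler).

-- ===== PORT A =====
-- _empty(h): h*4 rows of 8 Falses
def pvEmpty (h : Int) : List (List Bool) :=
  (PySem.List.pyRange 0 (h * 4) 1).map (fun _ => List.replicate 8 false)

-- g[r][c] = True ; every executed (r, c) is in range (r from range(r0, r1) with 0 ≤ r0, r1 ≤ len(g);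
-- c from range(pad, pad+w) with 0 ≤ pad, pad+w ≤ 8), so List.modify/List.set at r.toNat/c.toNat is exact here
def pvSetCell (g : List (List Bool)) (r c : Int) : List (List Bool) :=
  g.modify r.toNat (fun row => row.set c.toNat true)

def make_step_pyramid_grid_py (height : Int) : List (List Bool) :=
  let rows := height * 4
  let steps := min 4 (max 2 (PySem.Int.floordiv rows 3))
  let g := pvEmpty height
  let sh := max 1 (PySem.Int.floordiv rows steps)
  let g := (PySem.List.pyRange 0 steps 1).foldl (fun g s =>
    let r0 := s * sh
    let r1 := min rows (r0 + sh)
    let w := max 2 (8 - s * 2)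
    let pad := PySem.Int.floordiv (8 - w) 2
    (PySem.List.pyRange r0 r1 1).foldl (fun g r =>
      (PySem.List.pyRange pad (pad + w) 1).foldl (fun g c => pvSetCell g r c) g) g) g
  let g := (PySem.List.pyRange (steps * sh) rows 1).foldl (fun g r =>
    let w := max 2 (8 - (steps - 1) * 2)
    let pad := PySem.Int.floordiv (8 - w) 2
    (PySem.List.pyRange pad (pad + w) 1).foldl (fun g c => pvSetCell g r c) g) g
  g

-- ===== PORT B =====
def make_step_pyramid_grid_py_alt (height : Int) : List (List Bool) :=
  let rows := height * 4
  let steps := min 4 (max 2 (PySem.Int.floordiv rows 3))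
  let sh := max 1 (PySem.Int.floordiv rows steps)
  let pats := (PySem.List.pyRange 0 steps 1).foldl (fun pats s =>
    let w := max 2 (8 - s * 2)
    let pad := PySem.Int.floordiv (8 - w) 2
    pats ++ [List.replicate pad.toNat false ++ List.replicate w.toNat true ++
      List.replicate (8 - pad - w).toNat false]) []
  -- pats[min(r//sh, steps-1)]: this index is always in range (0 ≤ · < steps = len(pats)),
  -- so resolving pyGet?'s Option with getD [] is exact here; .copy() is the identity on Lean lists
  (PySem.List.pyRange 0 rows 1).map (fun r =>
    (PySem.List.pyGet? pats (min (PySem.Int.floordiv r sh) (steps - 1))).getD [])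

-- ===== PRECONDITION & SPEC =====
def Spec_make_step_pyramid_grid_py (height : Int) (out : List (List Bool)) : Prop := out = make_step_pyramid_grid_py_alt height
instance (height : Int) (out : List (List Bool)) : Decidable (Spec_make_step_pyramid_grid_py height out) := by unfold Spec_make_step_pyramid_grid_py; infer_instance

-- ===== CLAIM (what is proved, stated in full; the proofs are below) =====
def Claim_equal_make_step_pyramid_grid_py : Prop := ∀ (height : Int), Dom_make_step_pyramid_grid_py height → Spec_make_step_pyramid_grid_py height (make_step_pyramid_grid_py height)

-- ===== LEMMAS AND PROOFS =====

theorem pvModifyModify {α : Type} (l : List α) (i : Nat) (f g : α → α) :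
    (l.modify i f).modify i g = l.modify i (fun x => g (f x)) := by
  apply List.ext_getElem?
  intro j
  cases hl : l[j]? <;> by_cases h : i = j <;>
    simp [hl, h]

theorem pvModifyId {α : Type} (l : List α) (i : Nat) : l.modify i (fun x => x) = l := by
  apply List.ext_getElem?
  intro j
  simp [List.getElem?_modify]

-- the column loop on row r is a single modify of row r
theorem pvInnerFold (cs : List Int) (g : List (List Bool)) (r : Int) :
    cs.foldl (fun g c => pvSetCell g r c) g
      = g.modify r.toNat (fun row => cs.foldl (fun row c => row.set c.toNat true) row) := by
  induction cs generalizing g with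
  | nil => simp [pvModifyId]
  | cons c t ih =>
      rw [List.foldl_cons, ih]
      simp only [pvSetCell]
      rw [pvModifyModify]
      simp only [List.foldl_cons]

-- filling a row with true on columns pad..pad+w-1
def pvFillRow (pad w : Int) (row : List Bool) : List Bool :=
  (PySem.List.pyRange pad (pad + w) 1).foldl (fun row c => row.set c.toNat true) row

-- the row loop of one band: what ends up at index j
theorem pvBandGet (fRow : List Bool → List Bool) :
    ∀ (n : Nat) (a b : Int), 0 ≤ a → (b - a).toNat = n →
    ∀ (g : List (List Bool)) (j : Nat),
    ((PySem.List.pyRange a b 1).foldl (fun g r => g.modify r.toNat fRow) g)[j]?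
      = if a ≤ (j : Int) ∧ (j : Int) < b then g[j]?.map fRow else g[j]? := by
  intro n
  induction n with
  | zero =>
      intro a b ha hn g j
      rw [PySem.List.pyRange_one_eq_nil (by omega)]
      simp only [List.foldl_nil]
      rw [if_neg (by omega)]
  | succ m ih =>
      intro a b ha hn g j
      rw [PySem.List.pyRange_one_cons (by omega)]
      simp only [List.foldl_cons]
      rw [ih (a + 1) b (by omega) (by omega)]
      by_cases hj : (j : Int) = a
      · rw [if_neg (by omega), if_pos (by omega)]
        have hja : a.toNat = j := by omega
        simp [List.getElem?_modify, hja]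
      · by_cases hjin : a + 1 ≤ (j : Int) ∧ (j : Int) < b
        · rw [if_pos hjin, if_pos (by omega)]
          have hja : ¬ (a.toNat = j) := by omega
          simp [hja]
        · rw [if_neg hjin, if_neg (by omega)]
          have hja : ¬ (a.toNat = j) := by omega
          simp [hja]

theorem pvMapGet {β : Type} (f : Int → β) (n : Int) (j : Nat) (hj : (j : Int) < n) :
    ((PySem.List.pyRange 0 n 1).map f)[j]? = some (f (j : Int)) := by
  rw [List.getElem?_map, PySem.List.getElem?_pyRange_one, if_pos (by omega)]
  simp

theorem pvFdivPos (a b : Int) (hb : 0 ≤ b) : PySem.Int.floordiv a b = a / b := by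
  simp [PySem.Int.floordiv, Int.fdiv_eq_ediv, hb]

-- quotient of an element of the s-th band
theorem pvBandDiv (s h j : Int) (hh : 0 < h) (h0 : s * h ≤ j) (h1 : j < (s + 1) * h) :
    j / h = s := by
  obtain ⟨t, ht, rfl⟩ : ∃ t, 0 ≤ t ∧ j = t + s * h := ⟨j - s * h, by omega, by ring⟩
  rw [Int.add_mul_ediv_right _ _ (by omega), Int.ediv_eq_zero_of_lt ht (by nlinarith)]
  ring

theorem pvAltNonpos (height : Int) (hle : height ≤ 0) :
    make_step_pyramid_grid_py_alt height = [] := by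
  simp only [make_step_pyramid_grid_py_alt]
  rw [show PySem.List.pyRange 0 (height * 4) 1 = [] from
        PySem.List.pyRange_one_eq_nil (by omega)]
  rfl

theorem pvANonpos (height : Int) (hle : height ≤ 0) :
    make_step_pyramid_grid_py height = [] := by
  have hst : min 4 (max 2 (PySem.Int.floordiv (height * 4) 3)) = 2 := by
    rw [pvFdivPos _ _ (by omega)]; omega
  have hsh : max 1 (PySem.Int.floordiv (height * 4) 2) = 1 := by
    rw [pvFdivPos _ _ (by omega)]; omega
  simp only [make_step_pyramid_grid_py, pvEmpty, hst, hsh]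
  rw [PySem.List.pyRange_one_eq_nil (show height * 4 ≤ 0 by omega)]
  simp only [List.map_nil]
  have hr2 : PySem.List.pyRange 0 2 1 = [0, 1] := by decide
  rw [hr2]
  simp only [List.foldl_cons, List.foldl_nil]
  rw [PySem.List.pyRange_one_eq_nil (show min (height * 4) (0 * 1 + 1) ≤ 0 * 1 by omega),
      PySem.List.pyRange_one_eq_nil (show min (height * 4) (1 * 1 + 1) ≤ 1 * 1 by omega),
      PySem.List.pyRange_one_eq_nil (show height * 4 ≤ 2 * 1 by omega)]
  simp only [List.foldl_nil]

theorem pvMain3 (height : Int) (h3 : 3 ≤ height) :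
    make_step_pyramid_grid_py height = make_step_pyramid_grid_py_alt height := by
  have hsteps : min 4 (max 2 (PySem.Int.floordiv (height * 4) 3)) = 4 := by
    rw [pvFdivPos _ _ (by omega)]
    have h4 : 4 ≤ height * 4 / 3 := by
      rw [Int.le_ediv_iff_mul_le (by omega)]; omega
    omega
  have hsh : max 1 (PySem.Int.floordiv (height * 4) 4) = height := by
    rw [pvFdivPos _ _ (by omega)]
    have : height * 4 / 4 = height := Int.mul_ediv_cancel _ (by omega)
    omega
  simp only [make_step_pyramid_grid_py, make_step_pyramid_grid_py_alt, pvEmpty, hsteps, hsh]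
  have hrange4 : PySem.List.pyRange 0 4 1 = [0, 1, 2, 3] := by decide
  rw [hrange4]
  simp only [List.foldl_cons, List.foldl_nil]
  rw [PySem.List.pyRange_one_eq_nil (show height * 4 ≤ 4 * height by omega),
      List.foldl_nil]
  -- turn each band's nested loop into modify form
  have hband : ∀ (s : Int) (g : List (List Bool)),
      (PySem.List.pyRange (s * height) (min (height * 4) (s * height + height)) 1).foldl
        (fun g r =>
          (PySem.List.pyRange (PySem.Int.floordiv (8 - max 2 (8 - s * 2)) 2)
              (PySem.Int.floordiv (8 - max 2 (8 - s * 2)) 2 + max 2 (8 - s * 2)) 1).foldl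
            (fun g c => pvSetCell g r c) g) g
      = (PySem.List.pyRange (s * height) (min (height * 4) (s * height + height)) 1).foldl
          (fun g r => g.modify r.toNat
            (pvFillRow (PySem.Int.floordiv (8 - max 2 (8 - s * 2)) 2) (max 2 (8 - s * 2)))) g := by
    intro s g
    have hf : (fun (g : List (List Bool)) (r : Int) =>
        (PySem.List.pyRange (PySem.Int.floordiv (8 - max 2 (8 - s * 2)) 2)
            (PySem.Int.floordiv (8 - max 2 (8 - s * 2)) 2 + max 2 (8 - s * 2)) 1).foldl
          (fun g c => pvSetCell g r c) g)
        = (fun g r => g.modify r.toNat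
            (pvFillRow (PySem.Int.floordiv (8 - max 2 (8 - s * 2)) 2) (max 2 (8 - s * 2)))) := by
      funext g r
      exact pvInnerFold _ g r
    rw [hf]
  rw [hband 0, hband 1, hband 2, hband 3]
  apply List.ext_getElem?
  intro j
  rw [pvBandGet _ ((min (height * 4) (3 * height + height)) - 3 * height).toNat
        (3 * height) _ (by omega) rfl,
      pvBandGet _ ((min (height * 4) (2 * height + height)) - 2 * height).toNat
        (2 * height) _ (by omega) rfl,
      pvBandGet _ ((min (height * 4) (1 * height + height)) - 1 * height).toNat
        (1 * height) _ (by omega) rfl,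
      pvBandGet _ ((min (height * 4) (0 * height + height)) - 0 * height).toNat
        (0 * height) _ (by omega) rfl]
  by_cases hjr : (j : Int) < height * 4
  · rw [pvMapGet _ _ _ hjr, pvMapGet _ _ _ hjr]
    have hdiv : ∀ s : Int, s * height ≤ (j : Int) → (j : Int) < (s + 1) * height →
        PySem.Int.floordiv (j : Int) height = s := by
      intro s hs0 hs1
      rw [pvFdivPos _ _ (by omega)]
      exact pvBandDiv s height (j : Int) (by omega) hs0 hs1
    have hsplit : (0 * height ≤ (j : Int) ∧ (j : Int) < 1 * height) ∨
        (1 * height ≤ (j : Int) ∧ (j : Int) < 2 * height) ∨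
        (2 * height ≤ (j : Int) ∧ (j : Int) < 3 * height) ∨
        (3 * height ≤ (j : Int) ∧ (j : Int) < 4 * height) := by omega
    rcases hsplit with hb | hb | hb | hb
    · rw [if_neg (by omega), if_neg (by omega), if_neg (by omega), if_pos (by omega),
          hdiv 0 (by omega) (by omega)]
      decide
    · rw [if_neg (by omega), if_neg (by omega), if_pos (by omega), if_neg (by omega),
          hdiv 1 (by omega) (by omega)]
      decide
    · rw [if_neg (by omega), if_pos (by omega), if_neg (by omega), if_neg (by omega),
          hdiv 2 (by omega) (by omega)]
      decide
    · rw [if_pos (by omega), if_neg (by omega), if_neg (by omega), if_neg (by omega),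
          hdiv 3 (by omega) (by omega)]
      decide
  · rw [if_neg (by omega), if_neg (by omega), if_neg (by omega), if_neg (by omega)]
    rw [List.getElem?_map, PySem.List.getElem?_pyRange_one, if_neg (by omega),
        List.getElem?_map, PySem.List.getElem?_pyRange_one, if_neg (by omega)]
    rfl

-- ===== VERDICT (by name: the statement is the Claim_ definition above) =====
theorem make_step_pyramid_grid_py_spec : Claim_equal_make_step_pyramid_grid_py := by
  intro height _
  unfold Spec_make_step_pyramid_grid_py
  by_cases hle : height ≤ 0
  · rw [pvANonpos height hle, pvAltNonpos height hle]
  · have hpos : 0 < height := by omega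
    by_cases hge : 3 ≤ height
    · exact pvMain3 _ hge
    · interval_cases height <;> decide
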